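-- pv_equiv track=rewrite | github.com/HiroIshida/icra2024_greppable_program | parse.py | extract_tr_contents
-- ===== SOURCE A (Python) =====
-- def extract_tr_contents(html):
--     tr_contents = []
--     start_index = 0
--
--     while True:
--         start_index = html.find("<tr", start_index)
--         if start_index == -1:
--             break
--
--         end_index = html.find("</tr>", start_index)
--         if end_index == -1:
--             break
--
--         tr_content = html[start_index : end_index + 5]
--         tr_contents.append(tr_content.strip())
--
--         start_index = end_index + 5
--
--     return tr_contents
-- ===== SOURCE B (Python) =====
-- def extract_tr_contents(html):
--     # one left-to-right character scan with an explicit capture buffer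
--     out = []
--     buf = None  # None = outside a row; else the characters captured since "<tr"
--     i = 0
--     n = len(html)
--     while i < n:
--         if buf is None:
--             if html.startswith("<tr", i):
--                 buf = "<"
--             i += 1
--         else:
--             if html.startswith("</tr>", i):
--                 out.append((buf + "</tr>").strip())
--                 buf = None
--                 i += 5
--             else:
--                 buf += html[i]
--                 i += 1
--     return out
-- ===== Notes on version B (the rewrite author's own statement) =====
-- stated objective: alternative
-- what changed: A's repeated html.find cursor loop (re-searching for '<tr' and '</tr>' from each cursor position) is replaced by a single left-to-right character scan with an explicit capture buffer (a two-state machine: outside a row / capturing since '<tr').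
import Mathlib
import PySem

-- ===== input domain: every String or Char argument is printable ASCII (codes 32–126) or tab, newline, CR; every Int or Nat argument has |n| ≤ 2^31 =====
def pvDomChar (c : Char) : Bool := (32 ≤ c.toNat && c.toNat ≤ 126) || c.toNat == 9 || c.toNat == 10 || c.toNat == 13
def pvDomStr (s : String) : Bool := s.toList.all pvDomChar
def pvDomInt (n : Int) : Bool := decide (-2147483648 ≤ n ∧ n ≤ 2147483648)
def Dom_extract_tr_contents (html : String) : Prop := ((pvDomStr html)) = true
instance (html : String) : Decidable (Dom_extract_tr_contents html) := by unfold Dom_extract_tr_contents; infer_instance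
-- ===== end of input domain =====

-- B replaces A's repeated html.find cursor loop by a single left-to-right character scan
-- with an explicit capture buffer (objective: alternative — same cost, different traversal).

-- ===== PORT A =====
-- the while-loop of A: start_index advances past each captured "</tr>".
-- fuel only makes the recursion total; each iteration moves start_index forward,
-- so fuel = length + 1 (supplied by the wrapper) is never exhausted.
def pvLoopA (html : List Char) (fuel : Nat) (start_index : Int) : List (List Char) :=
  match fuel with
  | 0 => []
  | fuel + 1 =>
    let s := PySem.Chars.findFrom html ['<','t','r'] start_index none
    if s = -1 then []
    else
      let e := PySem.Chars.findFrom html ['<','/','t','r','>'] s none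
      if e = -1 then []
      else
        PySem.Chars.strip (PySem.Chars.slice html (some s) (some (e + 5))) ::
          pvLoopA html fuel (e + 5)

def extract_tr_contents (html : String) : List String :=
  (pvLoopA html.toList (html.toList.length + 1) 0).map String.ofList

-- ===== PORT B =====
-- the scan loop of B: buf = none outside a row, some b while capturing since "<tr"
def pvScanB (s : List Char) (buf : Option (List Char)) : List (List Char) :=
  match s, buf with
  | [], _ => []
  | c :: rest, none =>
      if PySem.Chars.startswith (c :: rest) ['<','t','r'] then pvScanB rest (some ['<'])
      else pvScanB rest none
  | c :: rest, some b =>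
      if PySem.Chars.startswith (c :: rest) ['<','/','t','r','>'] then
        PySem.Chars.strip (b ++ ['<','/','t','r','>']) :: pvScanB (rest.drop 4) none
      else pvScanB rest (some (b ++ [c]))
termination_by s.length
decreasing_by
  all_goals simp

def extract_tr_contents_alt (html : String) : List String :=
  (pvScanB html.toList none).map String.ofList

-- ===== PRECONDITION & SPEC =====
def Spec_extract_tr_contents (html : String) (out : List String) : Prop := out = extract_tr_contents_alt html
instance (html : String) (out : List String) : Decidable (Spec_extract_tr_contents html out) := by unfold Spec_extract_tr_contents; infer_instance

-- ===== CLAIM (what is proved, stated in full; the proofs are below) =====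
def Claim_equal_extract_tr_contents : Prop := ∀ (html : String), Dom_extract_tr_contents html → Spec_extract_tr_contents html (extract_tr_contents html)

-- ===== LEMMAS AND PROOFS =====

-- "<tr" and "</tr>" cannot start at the same position
theorem pvClash (t : List Char) (h1 : ['<','t','r'] <+: t)
    (h2 : ['<','/','t','r','>'] <+: t) : False := by
  obtain ⟨u, rfl⟩ := h1
  simp [List.cons_prefix_cons] at h2

theorem pvNotInfixDropSucc (l sub : List Char) (m : Nat)
    (h : ¬ sub <:+: l.drop m) : ¬ sub <:+: l.drop (m + 1) := by
  intro hi
  apply h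
  refine hi.trans ?_
  have h2 : l.drop (m + 1) <:+ l.drop m := by
    rw [← List.drop_drop]
    exact List.drop_suffix _ _
  exact h2.isInfix

theorem pvScanNoneNotFound (s : List Char) (h : ¬ ['<','t','r'] <:+: s) :
    pvScanB s none = [] := by
  induction s with
  | nil => rw [pvScanB]
  | cons c rest ih =>
    rw [pvScanB]
    have hsw : PySem.Chars.startswith (c :: rest) ['<','t','r'] = false := by
      cases hb : PySem.Chars.startswith (c :: rest) ['<','t','r']
      · rfl
      · exact absurd ((PySem.Chars.startswith_iff _ _).mp hb).isInfix h
    rw [hsw]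
    simp only [Bool.false_eq_true, if_false]
    exact ih (fun hi => h (hi.trans (List.suffix_cons c rest).isInfix))

theorem pvScanSomeNotFound (s b : List Char) (h : ¬ ['<','/','t','r','>'] <:+: s) :
    pvScanB s (some b) = [] := by
  induction s generalizing b with
  | nil => rw [pvScanB]
  | cons c rest ih =>
    rw [pvScanB]
    have hsw : PySem.Chars.startswith (c :: rest) ['<','/','t','r','>'] = false := by
      cases hb : PySem.Chars.startswith (c :: rest) ['<','/','t','r','>']
      · rfl
      · exact absurd ((PySem.Chars.startswith_iff _ _).mp hb).isInfix h
    rw [hsw]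
    simp only [Bool.false_eq_true, if_false]
    apply ih
    exact (fun hi => h (hi.trans (List.suffix_cons c rest).isInfix))

theorem pvScanNoneAt (s : List Char) (i : Nat)
    (hpre : ['<','t','r'] <+: s.drop i)
    (hmin : ∀ j < i, ¬ ['<','t','r'] <+: s.drop j) :
    pvScanB s none = pvScanB (s.drop (i + 1)) (some ['<']) := by
  induction s generalizing i with
  | nil => simp at hpre
  | cons c rest ih =>
    cases i with
    | zero =>
      have hsw : PySem.Chars.startswith (c :: rest) ['<','t','r'] = true :=
        (PySem.Chars.startswith_iff _ _).mpr (by simpa using hpre)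
      rw [pvScanB, hsw]
      simp
    | succ i =>
      have hsw : PySem.Chars.startswith (c :: rest) ['<','t','r'] = false := by
        cases hb : PySem.Chars.startswith (c :: rest) ['<','t','r']
        · rfl
        · exact absurd ((PySem.Chars.startswith_iff _ _).mp hb) (by simpa using hmin 0 (by omega))
      rw [pvScanB, hsw]
      simp only [Bool.false_eq_true, if_false, List.drop_succ_cons]
      exact ih i (by simpa using hpre) (fun j hj => by simpa using hmin (j + 1) (by omega))

theorem pvScanSomeAt (s b : List Char) (i : Nat)
    (hpre : ['<','/','t','r','>'] <+: s.drop i)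
    (hmin : ∀ j < i, ¬ ['<','/','t','r','>'] <+: s.drop j) :
    pvScanB s (some b) =
      PySem.Chars.strip (b ++ s.take i ++ ['<','/','t','r','>']) ::
        pvScanB (s.drop (i + 5)) none := by
  induction s generalizing i b with
  | nil => simp at hpre
  | cons c rest ih =>
    cases i with
    | zero =>
      have hsw : PySem.Chars.startswith (c :: rest) ['<','/','t','r','>'] = true :=
        (PySem.Chars.startswith_iff _ _).mpr (by simpa using hpre)
      rw [pvScanB, hsw]
      simp [List.drop_succ_cons]
    | succ i =>
      have hsw : PySem.Chars.startswith (c :: rest) ['<','/','t','r','>'] = false := by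
        cases hb : PySem.Chars.startswith (c :: rest) ['<','/','t','r','>']
        · rfl
        · exact absurd ((PySem.Chars.startswith_iff _ _).mp hb) (by simpa using hmin 0 (by omega))
      rw [pvScanB, hsw]
      simp only [Bool.false_eq_true, if_false, List.drop_succ_cons, List.take_succ_cons]
      rw [ih (b ++ [c]) i (by simpa using hpre) (fun j hj => by simpa using hmin (j + 1) (by omega))]
      simp

theorem pvTakePrefixAppend (p l : List Char) (n : Nat) (h : p <+: l.drop n) :
    l.take n ++ p = l.take (n + p.length) := by
  rw [List.take_add]
  congr 1
  exact List.prefix_iff_eq_take.mp h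

theorem pvMain (l : List Char) (d : Nat) : ∀ k : Nat, l.length ≤ k + d → k ≤ l.length →
    pvLoopA l (d + 1) (k : Int) = pvScanB (l.drop k) none := by
  induction d with
  | zero =>
    intro k h1 h2
    have hk : k = l.length := by omega
    rw [pvLoopA, PySem.Chars.findFrom_natCast l ['<','t','r'] k h2]
    have hfind : PySem.Chars.find (l.drop k) ['<','t','r'] = -1 := by
      rw [PySem.Chars.find_eq_neg_one_iff]
      subst hk; simp
    rw [hfind]
    simp only [reduceIte]
    exact (pvScanNoneNotFound _ ((PySem.Chars.find_eq_neg_one_iff _ _).mp hfind)).symm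
  | succ d ih =>
    intro k h1 h2
    rw [pvLoopA, PySem.Chars.findFrom_natCast l ['<','t','r'] k h2]
    by_cases hf : PySem.Chars.find (l.drop k) ['<','t','r'] = -1
    · rw [hf]
      simp only [reduceIte]
      exact (pvScanNoneNotFound _ ((PySem.Chars.find_eq_neg_one_iff _ _).mp hf)).symm
    · rw [if_neg hf]
      have hf0 : 0 ≤ PySem.Chars.find (l.drop k) ['<','t','r'] := by
        have := PySem.Chars.neg_one_le_find (l.drop k) ['<','t','r']; omega
      obtain ⟨hfpre, hfmin⟩ := PySem.Chars.find_spec (s := l.drop k) (sub := ['<','t','r']) hf0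
      set fn := (PySem.Chars.find (l.drop k) ['<','t','r']).toNat with hfn
      have hfcast : PySem.Chars.find (l.drop k) ['<','t','r'] = (fn : Int) := by omega
      have hkfn3 : k + fn + 3 ≤ l.length := by
        have hle := hfpre.length_le
        simp only [List.drop_drop, List.length_drop, List.length_cons, List.length_nil] at hle
        omega
      have hcast2 : (k : Int) + PySem.Chars.find (l.drop k) ['<','t','r'] = ((k + fn : Nat) : Int) := by
        rw [hfcast]; push_cast; ring
      rw [hcast2, if_neg (show ¬ ((k + fn : Nat) : Int) = -1 by push_cast; omega)]
      simp only []
      rw [PySem.Chars.findFrom_natCast l ['<','/','t','r','>'] (k + fn) (by omega)]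
      have hdd : (l.drop k).drop fn = l.drop (k + fn) := by rw [List.drop_drop]
      by_cases hg : PySem.Chars.find (l.drop (k + fn)) ['<','/','t','r','>'] = -1
      · rw [hg]
        simp only [reduceIte]
        rw [pvScanNoneAt (l.drop k) fn hfpre hfmin, List.drop_drop]
        refine (pvScanSomeNotFound _ _ ?_).symm
        have hni := pvNotInfixDropSucc l ['<','/','t','r','>'] (k + fn)
          ((PySem.Chars.find_eq_neg_one_iff _ _).mp hg)
        have e : k + (fn + 1) = k + fn + 1 := by omega
        rw [e]; exact hni
      · rw [if_neg hg]
        have hg0 : 0 ≤ PySem.Chars.find (l.drop (k + fn)) ['<','/','t','r','>'] := by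
          have := PySem.Chars.neg_one_le_find (l.drop (k + fn)) ['<','/','t','r','>']; omega
        obtain ⟨hgpre, hgmin⟩ := PySem.Chars.find_spec (s := l.drop (k + fn))
          (sub := ['<','/','t','r','>']) hg0
        set gn := (PySem.Chars.find (l.drop (k + fn)) ['<','/','t','r','>']).toNat with hgn
        have hgcast : PySem.Chars.find (l.drop (k + fn)) ['<','/','t','r','>'] = (gn : Int) := by omega
        have hgn1 : 1 ≤ gn := by
          rcases Nat.eq_zero_or_pos gn with h0 | h0
          · exfalso
            refine pvClash (l.drop (k + fn)) ?_ ?_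
            · rw [← hdd]; exact hfpre
            · simpa [h0] using hgpre
          · exact h0
        have hlen5 : k + fn + gn + 5 ≤ l.length := by
          have hle := hgpre.length_le
          simp only [List.drop_drop, List.length_drop, List.length_cons, List.length_nil] at hle
          omega
        rw [hgcast]
        rw [if_neg (show ¬ ((k + fn : Nat) : Int) + (gn : Int) = -1 by push_cast; omega)]
        have hcast3 : ((k + fn : Nat) : Int) + (gn : Int) + 5 = ((k + fn + gn + 5 : Nat) : Int) := by
          push_cast; ring
        rw [hcast3]
        rw [pvScanNoneAt (l.drop k) fn hfpre hfmin, List.drop_drop]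
        have e1 : k + (fn + 1) = k + fn + 1 := by omega
        rw [e1]
        have hgpre' : ['<','/','t','r','>'] <+: l.drop (k + fn + gn) := by
          have h := hgpre
          rw [List.drop_drop] at h
          exact h
        have hpre2 : ['<','/','t','r','>'] <+: (l.drop (k + fn + 1)).drop (gn - 1) := by
          rw [List.drop_drop, show k + fn + 1 + (gn - 1) = k + fn + gn from by omega]
          exact hgpre'
        have hmin2 : ∀ j < gn - 1, ¬ ['<','/','t','r','>'] <+: (l.drop (k + fn + 1)).drop j := by
          intro j hj
          have hm := hgmin (1 + j) (by omega)
          rw [List.drop_drop] at hm ⊢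
          rw [show k + fn + 1 + j = k + fn + (1 + j) from by omega]
          exact hm
        rw [pvScanSomeAt (l.drop (k + fn + 1)) ['<'] (gn - 1) hpre2 hmin2]
        rw [List.drop_drop, show k + fn + 1 + (gn - 1 + 5) = k + fn + gn + 5 from by omega]
        rw [← ih (k + fn + gn + 5) (by omega) (by omega)]
        congr 1
        -- heads
        rw [PySem.Chars.slice_eq_listSlice, PySem.List.slice_natCast,
          show k + fn + gn + 5 - (k + fn) = gn + 5 from by omega]
        have h5 := pvTakePrefixAppend ['<','/','t','r','>'] (l.drop (k + fn)) gn hgpre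
        simp only [List.length_cons, List.length_nil] at h5
        have h5' : List.take gn (List.drop (k + fn) l) ++ ['<','/','t','r','>'] =
            List.take (gn + 5) (List.drop (k + fn) l) := by rw [h5]
        rw [← h5']
        rw [hdd] at hfpre
        obtain ⟨u, hu⟩ := hfpre
        have htail : List.drop (k + fn + 1) l = 't' :: 'r' :: u := by
          rw [← List.tail_drop, ← hu]
          rfl
        have htk : List.take gn (List.drop (k + fn) l) =
            '<' :: List.take (gn - 1) (List.drop (k + fn + 1) l) := by
          rw [← hu, htail]
          obtain ⟨m, hm⟩ : ∃ m, gn = m + 1 := ⟨gn - 1, by omega⟩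
          rw [hm]
          simp [List.take_succ_cons]
        rw [htk]
        simp


-- ===== VERDICT (by name: the statement is the Claim_ definition above) =====
theorem extract_tr_contents_spec : Claim_equal_extract_tr_contents := by
  intro html _
  unfold Spec_extract_tr_contents extract_tr_contents extract_tr_contents_alt
  have := pvMain html.toList html.toList.length 0 (by omega) (by omega)
  simpa using congrArg (List.map String.ofList) this
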